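-- pv_equiv track=rewrite | github.com/EthanHunt711/Turtle | strings-supp.py | dup_some
-- ===== SOURCE A (Python) =====
-- def dup_some(string, to_duplicate):
--     new_string = ''
--     for char in string:
--         if char in to_duplicate:
--             new_string += char * 2
--         else:
--             new_string += char
--     return new_string
-- ===== SOURCE B (Python) =====
-- def dup_some(string, to_duplicate):
--     table = {ord(c): c * 2 for c in set(string) if c in to_duplicate}
--     return string.translate(table)
-- ===== Notes on version B (the rewrite author's own statement) =====
-- stated objective: idiomatic
-- what changed: Replaces A's per-character string concatenation loop with a translation table precomputed from the distinct characters of the string, applied via str.translate in one pass.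
import Mathlib
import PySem

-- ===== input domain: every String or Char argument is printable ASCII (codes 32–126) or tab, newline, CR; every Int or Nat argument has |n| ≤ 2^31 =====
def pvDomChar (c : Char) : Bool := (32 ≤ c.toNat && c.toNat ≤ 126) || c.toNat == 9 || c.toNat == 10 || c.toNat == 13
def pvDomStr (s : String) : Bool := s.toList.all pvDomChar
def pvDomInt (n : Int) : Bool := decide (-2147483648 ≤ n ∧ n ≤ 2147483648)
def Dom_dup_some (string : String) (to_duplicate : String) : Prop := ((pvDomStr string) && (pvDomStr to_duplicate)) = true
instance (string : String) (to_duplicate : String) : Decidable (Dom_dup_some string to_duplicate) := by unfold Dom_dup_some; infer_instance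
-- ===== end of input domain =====

-- B replaces A's per-character string accumulation with a translation table built from
-- the distinct characters of `string`, applied in one pass (idiomatic str.translate).


-- ===== PORT A =====
-- for char in string: new_string += char*2 if char in to_duplicate else char
def dup_some (string : String) (to_duplicate : String) : String :=
  String.ofList (string.toList.foldl
    (fun acc c =>
      if PySem.Chars.isIn [c] to_duplicate.toList then acc ++ [c, c] else acc ++ [c])
    [])

-- ===== PORT B =====
-- table = {ord(c): c*2 for c in set(string) if c in to_duplicate}; return string.translate(table)
def dup_some_alt (string : String) (to_duplicate : String) : String :=
  let table : PySem.Dict Int (List Char) :=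
    (PySem.Set.ofList string.toList).foldl
      (fun d c =>
        if PySem.Chars.isIn [c] to_duplicate.toList then d.insert (c.toNat : Int) [c, c] else d)
      PySem.Dict.empty
  -- str.translate: each char is replaced by its table entry, kept unchanged if absent
  String.ofList (string.toList.flatMap (fun c => (table.get? (c.toNat : Int)).getD [c]))

-- ===== PRECONDITION & SPEC =====
def Spec_dup_some (string : String) (to_duplicate : String) (out : String) : Prop := out = dup_some_alt string to_duplicate
instance (string : String) (to_duplicate : String) (out : String) : Decidable (Spec_dup_some string to_duplicate out) := by unfold Spec_dup_some; infer_instance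

-- ===== CLAIM (what is proved, stated in full; the proofs are below) =====
def Claim_equal_dup_some : Prop := ∀ (string : String) (to_duplicate : String), Dom_dup_some string to_duplicate → Spec_dup_some string to_duplicate (dup_some string to_duplicate)

-- ===== LEMMAS AND PROOFS =====

-- A's accumulation loop is the flatMap of the per-character choice.
theorem dupA_foldl (t : List Char) (l acc : List Char) :
    l.foldl (fun acc c =>
      if PySem.Chars.isIn [c] t then acc ++ [c, c] else acc ++ [c]) acc
      = acc ++ l.flatMap (fun c => if PySem.Chars.isIn [c] t then [c, c] else [c]) := by
  induction l generalizing acc with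
  | nil => simp
  | cons c l ih =>
    simp only [List.foldl_cons, List.flatMap_cons, ih]
    split_ifs <;> simp

-- What B's table answers for any character, as a function of membership in the fold's list.
theorem tableGet (t : List Char) (l : List Char) (d0 : PySem.Dict Int (List Char)) (c : Char) :
    (l.foldl (fun d c' =>
        if PySem.Chars.isIn [c'] t then d.insert (c'.toNat : Int) [c', c'] else d) d0).get?
        (c.toNat : Int)
      = if c ∈ l ∧ PySem.Chars.isIn [c] t then some [c, c] else d0.get? (c.toNat : Int) := by
  induction l generalizing d0 with
  | nil => simp
  | cons c' l ih =>
    simp only [List.foldl_cons, ih, List.mem_cons]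
    by_cases hmem : c ∈ l ∧ PySem.Chars.isIn [c] t = true
    · simp [hmem]
    · simp only [if_neg hmem]
      by_cases hcc : c = c'
      · subst hcc
        by_cases hf : PySem.Chars.isIn [c] t = true
        · simp [hf, PySem.Dict.get?_insert_self]
        · simp [hf]
      · have hkey : (c.toNat : Int) ≠ (c'.toNat : Int) := by
          intro h
          have hnat : c.toNat = c'.toNat := by exact_mod_cast h
          have h1 := Char.ofNat_toNat c
          have h2 := Char.ofNat_toNat c'
          exact hcc (by rw [← h1, ← h2, hnat])
        have hR : ¬((c = c' ∨ c ∈ l) ∧ PySem.Chars.isIn [c] t = true) := by tauto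
        rw [if_neg hR]
        by_cases hf : PySem.Chars.isIn [c'] t = true
        · rw [if_pos hf, PySem.Dict.get?_insert, if_neg hkey]
        · rw [if_neg hf]

-- flatMap only depends on the values at members.
theorem flatMap_congr_mem {α β : Type} (l : List α) (f g : α → List β)
    (h : ∀ x ∈ l, f x = g x) : l.flatMap f = l.flatMap g := by
  induction l with
  | nil => rfl
  | cons x l ih =>
    simp only [List.flatMap_cons, h x (List.mem_cons_self), ih (fun y hy => h y (List.mem_cons_of_mem x hy))]

-- ===== VERDICT (by name: the statement is the Claim_ definition above) =====
theorem dup_some_spec : Claim_equal_dup_some := by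
  intro string to_duplicate _
  unfold Spec_dup_some dup_some dup_some_alt
  rw [dupA_foldl]
  simp only [List.nil_append]
  congr 1
  apply flatMap_congr_mem
  intro c hc
  rw [tableGet]
  have hset : c ∈ PySem.Set.ofList string.toList := (PySem.Set.mem_ofList _ _).mpr hc
  by_cases hf : PySem.Chars.isIn [c] to_duplicate.toList = true
  · simp [hset, hf]
  · simp [hf, PySem.Dict.get?_empty]
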